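-- pv_equiv track=rewrite | github.com/BelleGarlick/Comp61332-Text-Mining---Dream-Team | src/sentence_classifier/preprocessing/tokenisation/tokeniser.py | merge_comma_seperated_numers
-- ===== SOURCE A (Python) =====
-- from typing import List
--
-- TOKEN_CHAR_NUM = "number"
--
-- TOKEN_CHAR_MONEY = "money"
--
-- def merge_comma_seperated_numers(tokens: List[str]) -> List[str]:
--     """
--     Some numbers like 1,000 are seperated out to 1, ,, 000. This function merges them into one token.
--
--     This function iterates backwards through the list of tokens merging tokens which are seperated by a comma. This
--     should help reduce the size of the data whilst retaining the same semantic informations.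
--
--     Args:
--         tokens: The list of expansive tokens.
--
--     Returns:
--         The list of tokens with the comma seperated number concatinated.
--     """
--     if TOKEN_CHAR_NUM in tokens:
--         for i in range(len(tokens) - 1, -1, -1):
--             if i < len(tokens):
--                 if tokens[i] == TOKEN_CHAR_NUM and tokens[i - 1] == "," and \
--                         tokens[i - 2] in {TOKEN_CHAR_MONEY, TOKEN_CHAR_NUM}:
--                     del tokens[i]
--                     del tokens[i - 1]
--
--     return tokens
-- ===== SOURCE B (Python) =====
-- from typing import List
--
-- TOKEN_CHAR_NUM = "number"
--
-- TOKEN_CHAR_MONEY = "money"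
--
-- def merge_comma_seperated_numers(tokens: List[str]) -> List[str]:
--     """Single forward pass with a stack: when a 'number' token follows
--     '<money-or-number> ,' in the output built so far, drop the ',' and
--     the 'number' (the pair merges into the preceding token)."""
--     out = []
--     for tok in tokens:
--         if tok == TOKEN_CHAR_NUM and len(out) >= 2 and out[-1] == "," \
--                 and out[-2] in (TOKEN_CHAR_MONEY, TOKEN_CHAR_NUM):
--             out.pop()
--         else:
--             out.append(tok)
--     tokens[:] = out
--     return tokens
-- ===== Notes on version B (the rewrite author's own statement) =====
-- stated objective: alternative
-- what changed: Replaces A's backward index loop with repeated in-place list deletions (and negative-index wraparound reads) by a single forward pass that keeps an output stack and pops the trailing ',' when a mergeable 'number' arrives.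
-- intended difference: On lists where the pattern wraps around the list boundary (tokens starting ', number' and ending in money/number, or starting 'number' and ending in '<money-or-number> ,'), A's negative-index reads tokens[i-1]/tokens[i-2] wrap around and it deletes tokens across the boundary (e.g. ['number', ','] -> []), while B returns such lists unchanged, which is intended since that 'number' is not actually preceded by '<money-or-number> ,'. — e.g. on merge_comma_seperated_numers(["number", ","]): A returns [], B returns ["number", ","]
import Mathlib
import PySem

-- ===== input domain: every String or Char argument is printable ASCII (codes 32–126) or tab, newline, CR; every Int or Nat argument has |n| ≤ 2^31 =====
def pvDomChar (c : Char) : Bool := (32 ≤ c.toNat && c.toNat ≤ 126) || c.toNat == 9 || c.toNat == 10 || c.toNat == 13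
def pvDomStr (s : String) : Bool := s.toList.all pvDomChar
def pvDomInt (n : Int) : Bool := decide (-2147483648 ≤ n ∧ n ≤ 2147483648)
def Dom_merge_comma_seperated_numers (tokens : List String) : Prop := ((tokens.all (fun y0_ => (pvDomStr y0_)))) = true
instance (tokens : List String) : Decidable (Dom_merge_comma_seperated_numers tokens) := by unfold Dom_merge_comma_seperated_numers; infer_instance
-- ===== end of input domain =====

-- B replaces A's backward index loop with repeated in-place deletions by one forward stack pass.
-- Both Pythons mutate `tokens` in place and return it; the theorems are about the return value.

-- ===== PORT A =====
-- `del xs[i]` (index known valid; negative index counts from the end)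
def pvDel (xs : List String) (i : Int) : List String :=
  if i < 0 then xs.take (i + xs.length).toNat ++ xs.drop ((i + xs.length).toNat + 1)
  else xs.take i.toNat ++ xs.drop (i.toNat + 1)

-- one iteration of A's `for i in range(len(tokens)-1, -1, -1)` body; the `tokens[i-2]` read
-- is ported as pyGet? (it can never be out of range when the first two conjuncts hold)
def pvStepA (xs : List String) (i : Int) : List String :=
  if i < (xs.length : Int) then
    if PySem.List.pyGet? xs i = some "number" ∧ PySem.List.pyGet? xs (i - 1) = some "," ∧
        (PySem.List.pyGet? xs (i - 2) = some "money" ∨ PySem.List.pyGet? xs (i - 2) = some "number") then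
      pvDel (pvDel xs i) (i - 1)
    else xs
  else xs

def merge_comma_seperated_numers (tokens : List String) : List String :=
  if "number" ∈ tokens then
    (PySem.List.pyRange ((tokens.length : Int) - 1) (-1) (-1)).foldl pvStepA tokens
  else tokens

-- ===== PORT B =====
-- one iteration of B's forward pass; acc is the output stack `out` in reverse
def pvStepB (acc : List String) (t : String) : List String :=
  if t = "number" then
    match acc with
    | a :: x :: rest =>
        if a = "," ∧ (x = "money" ∨ x = "number") then x :: rest else t :: acc
    | _ => t :: acc
  else t :: acc

def merge_comma_seperated_numers_alt (tokens : List String) : List String :=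
  (tokens.foldl pvStepB []).reverse

-- ===== PRECONDITION & SPEC =====
-- When the ',number' pattern wraps around the ends of the list (tokens = ', number …
-- <money|number>' or tokens = 'number … <money|number> ,'), A's negative-index reads
-- tokens[i-1]/tokens[i-2] wrap around and it deletes tokens across the list boundary
-- (e.g. ['number', ','] -> []); B returns such lists unchanged, which is intended since
-- that 'number' is not actually preceded by '<money|number> ,'.
def D_merge_comma_seperated_numers (tokens : List String) : Prop :=
  (tokens[0]? = some "," ∧ tokens[1]? = some "number" ∧
      (tokens.reverse[0]? = some "money" ∨ tokens.reverse[0]? = some "number"))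
  ∨ (tokens[0]? = some "number" ∧ tokens.reverse[0]? = some "," ∧
      (tokens.reverse[1]? = some "money" ∨ tokens.reverse[1]? = some "number"))
instance (tokens : List String) : Decidable (D_merge_comma_seperated_numers tokens) := by
  unfold D_merge_comma_seperated_numers; infer_instance

def Spec_merge_comma_seperated_numers (tokens : List String) (out : List String) : Prop :=
  ¬ D_merge_comma_seperated_numers tokens → out = merge_comma_seperated_numers_alt tokens
instance (tokens : List String) (out : List String) : Decidable (Spec_merge_comma_seperated_numers tokens out) := by
  unfold Spec_merge_comma_seperated_numers; infer_instance

def pvDiffWitness_merge_comma_seperated_numers : List String := ["number", ","]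
def pvDiffWitnessOut_merge_comma_seperated_numers : (List String) × (List String) :=
  ([], ["number", ","])

-- ===== CLAIM (what is proved, stated in full; the proofs are below) =====
def Claim_unchanged_merge_comma_seperated_numers : Prop := ∀ (tokens : List String), Dom_merge_comma_seperated_numers tokens → Spec_merge_comma_seperated_numers tokens (merge_comma_seperated_numers tokens)
def Claim_exact_merge_comma_seperated_numers : Prop := ∀ (tokens : List String), Dom_merge_comma_seperated_numers tokens → D_merge_comma_seperated_numers tokens → merge_comma_seperated_numers tokens ≠ merge_comma_seperated_numers_alt tokens
def Claim_changed_merge_comma_seperated_numers : Prop := Dom_merge_comma_seperated_numers (pvDiffWitness_merge_comma_seperated_numers) ∧ D_merge_comma_seperated_numers (pvDiffWitness_merge_comma_seperated_numers) ∧ merge_comma_seperated_numers (pvDiffWitness_merge_comma_seperated_numers) = pvDiffWitnessOut_merge_comma_seperated_numers.1 ∧ merge_comma_seperated_numers_alt (pvDiffWitness_merge_comma_seperated_numers) = pvDiffWitnessOut_merge_comma_seperated_numers.2 ∧ pvDiffWitnessOut_merge_comma_seperated_numers.1 ≠ pvDiffWitnessOut_merge_comma_seperated_numers.2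

-- ===== LEMMAS AND PROOFS =====

-- the descending index list [k-1, …, 1, 0] that A's range produces
def pvDescR : Nat → List Int
  | 0 => []
  | k + 1 => (k : Int) :: pvDescR k

lemma pvDescR_eq (n : Nat) :
    PySem.List.pyRange ((n : Int) - 1) (-1) (-1) = pvDescR n := by
  induction n with
  | zero =>
      show PySem.List.pyRange ((0 : Int) - 1) (-1) (-1) = []
      rw [PySem.List.pyRange_neg_one_eq_nil (by norm_num)]
  | succ k ih =>
      rw [show ((k + 1 : Nat) : Int) - 1 = (k : Int) by push_cast; ring]
      rw [PySem.List.pyRange_neg_one_cons (by omega)]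
      simp [pvDescR, ← ih]

-- a redex of the rewrite '<money|number> , number → <money|number>' whose 'number' is at index j
def pvRedexAt (l : List String) (j : Nat) : Prop :=
  2 ≤ j ∧ l[j]? = some "number" ∧ l[j - 1]? = some "," ∧
    (l[j - 2]? = some "money" ∨ l[j - 2]? = some "number")

def pvNF (l : List String) : Prop :=
  ∀ a x s, l = a ++ x :: "," :: "number" :: s → ¬(x = "money" ∨ x = "number")

lemma pvStepB_cases (acc : List String) (t : String) :
    pvStepB acc t = t :: acc ∨
      (t = "number" ∧ ∃ x r, acc = "," :: x :: r ∧ (x = "money" ∨ x = "number") ∧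
        pvStepB acc t = x :: r) := by
  unfold pvStepB
  by_cases ht : t = "number"
  · simp only [ht, if_true]
    rcases acc with _ | ⟨a, _ | ⟨b, r⟩⟩
    · left; rfl
    · left; rfl
    · by_cases hc : a = "," ∧ (b = "money" ∨ b = "number")
      · right; exact ⟨trivial, b, r, by rw [hc.1], hc.2, by simp [hc]⟩
      · left; simp [hc]
  · simp [ht]

lemma pvStepB_head_set (acc : List String) (x : String) (hx : x = "money" ∨ x = "number") :
    ∃ h t, pvStepB acc x = h :: t ∧ (h = "money" ∨ h = "number") := by
  rcases pvStepB_cases acc x with h | ⟨_, y, r, _, hy, h⟩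
  · exact ⟨x, acc, h, hx⟩
  · exact ⟨y, r, h, hy⟩

lemma pvFoldB_contract (acc : List String) (x : String) (s : List String)
    (hx : x = "money" ∨ x = "number") :
    List.foldl pvStepB acc (x :: "," :: "number" :: s) = List.foldl pvStepB acc (x :: s) := by
  simp only [List.foldl_cons]
  obtain ⟨h, t, he, hh⟩ := pvStepB_head_set acc x hx
  rw [he]
  congr 1
  have h1 : pvStepB (h :: t) "," = "," :: h :: t := by
    unfold pvStepB; simp
  rw [h1]
  unfold pvStepB
  simp [hh]

lemma pvAlt_contract (a : List String) (x : String) (s : List String)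
    (hx : x = "money" ∨ x = "number") :
    merge_comma_seperated_numers_alt (a ++ x :: "," :: "number" :: s) =
      merge_comma_seperated_numers_alt (a ++ x :: s) := by
  unfold merge_comma_seperated_numers_alt
  rw [List.foldl_append, List.foldl_append, pvFoldB_contract _ _ _ hx]

lemma pvFoldB_noNumber (suf : List String) : ∀ acc, "number" ∉ suf →
    List.foldl pvStepB acc suf = suf.reverse ++ acc := by
  induction suf with
  | nil => intro acc _; simp
  | cons t rest ih =>
      intro acc h
      have ht : t ≠ "number" := fun he => h (he ▸ List.mem_cons_self ..)
      have hstep : pvStepB acc t = t :: acc := by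
        unfold pvStepB; simp [fun he => ht he]
      simp only [List.foldl_cons, hstep, ih (t :: acc) (fun hm => h (List.mem_cons_of_mem _ hm))]
      simp

lemma pvAlt_noNumber (xs : List String) (h : "number" ∉ xs) :
    merge_comma_seperated_numers_alt xs = xs := by
  unfold merge_comma_seperated_numers_alt
  rw [pvFoldB_noNumber xs [] h]
  simp

lemma pvFoldB_NF (suf : List String) : ∀ acc, pvNF (acc.reverse ++ suf) →
    List.foldl pvStepB acc suf = suf.reverse ++ acc := by
  induction suf with
  | nil => intro acc _; simp
  | cons t rest ih =>
      intro acc h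
      rcases pvStepB_cases acc t with hstep | ⟨ht, y, r, hacc, hy, _⟩
      · have h' : pvNF ((t :: acc).reverse ++ rest) := by
          intro a x s he
          exact h a x s (by simpa [List.append_assoc] using he)
        simp only [List.foldl_cons, hstep, ih (t :: acc) h']
        simp
      · exfalso
        refine h r.reverse y rest ?_ hy
        subst ht hacc
        simp

lemma pvAlt_NF (xs : List String) (h : pvNF xs) :
    merge_comma_seperated_numers_alt xs = xs := by
  unfold merge_comma_seperated_numers_alt
  rw [pvFoldB_NF xs [] (by simpa using h)]
  simp

lemma pvNF_of_noRedex (l : List String) (h : ∀ j, ¬ pvRedexAt l j) : pvNF l := by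
  intro a x s he hx
  apply h (a.length + 2)
  refine ⟨by omega, ?_, ?_, ?_⟩
  · rw [he, List.getElem?_append_right (by omega)]
    simp
  · rw [he, List.getElem?_append_right (by omega)]
    simp
  · rw [show a.length + 2 - 2 = a.length by omega, he,
      List.getElem?_append_right (le_refl _)]
    simp [hx]

-- loop invariant relating the mutated list xs to the original tokens
def pvInv (t xs : List String) : Prop :=
  xs[0]? = t[0]?
  ∧ (t[0]? = some "," → xs[1]? = t[1]?)
  ∧ ((xs.reverse[0]? = some "money" ∨ xs.reverse[0]? = some "number") ↔
      (t.reverse[0]? = some "money" ∨ t.reverse[0]? = some "number"))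
  ∧ (xs.reverse[0]? = some "," ↔ t.reverse[0]? = some ",")
  ∧ (t.reverse[0]? = some "," →
      ((xs.reverse[1]? = some "money" ∨ xs.reverse[1]? = some "number") ↔
        (t.reverse[1]? = some "money" ∨ t.reverse[1]? = some "number")))
  ∧ merge_comma_seperated_numers_alt xs = merge_comma_seperated_numers_alt t

lemma pvInv_refl (t : List String) : pvInv t t := by
  unfold pvInv; tauto

lemma pvInv_contract (t a : List String) (x : String) (s : List String)
    (hx : x = "money" ∨ x = "number")
    (h : pvInv t (a ++ x :: "," :: "number" :: s)) : pvInv t (a ++ x :: s) := by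
  obtain ⟨h1, h2, h3, h4, h5, h6⟩ := h
  have hrevu : (a ++ x :: "," :: "number" :: s).reverse =
      s.reverse ++ ("number" :: "," :: x :: a.reverse) := by simp
  have hrevv : (a ++ x :: s).reverse = s.reverse ++ (x :: a.reverse) := by simp
  refine ⟨?_, ?_, ?_, ?_, ?_, ?_⟩
  · rw [← h1]
    rcases a with _ | ⟨a0, a'⟩ <;> simp
  · intro hc
    rw [← h2 hc]
    rcases a with _ | ⟨a0, _ | ⟨a1, a'⟩⟩
    · exfalso
      rw [hc] at h1
      rcases hx with hx | hx <;> subst hx <;> simp at h1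
    · simp
    · simp
  · rcases s with _ | ⟨s0, s'⟩
    · rw [hrevv]
      rw [hrevu] at h3
      rcases hx with hx | hx <;> subst hx <;> simp_all
    · have hl : 0 < ((s0 :: s').reverse).length := by simp
      rw [hrevu, List.getElem?_append_left hl] at h3
      rw [hrevv, List.getElem?_append_left hl]
      exact h3
  · rcases s with _ | ⟨s0, s'⟩
    · rw [hrevv]
      rw [hrevu] at h4
      rcases hx with hx | hx <;> subst hx <;> simp_all
    · have hl : 0 < ((s0 :: s').reverse).length := by simp
      rw [hrevu, List.getElem?_append_left hl] at h4
      rw [hrevv, List.getElem?_append_left hl]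
      exact h4
  · intro hc
    rcases s with _ | ⟨s0, _ | ⟨s1, s'⟩⟩
    · exfalso
      rw [hrevu] at h4
      simp at h4
      exact h4 hc
    · rw [hrevu] at h5
      rw [hrevv]
      simp only [List.reverse_cons, List.reverse_nil, List.nil_append] at h5 ⊢
      simp only [List.cons_append, List.nil_append] at h5 ⊢
      simp at h5 ⊢
      rcases hx with hx | hx <;> subst hx <;> simp_all
    · have hl : 1 < ((s0 :: s1 :: s').reverse).length := by simp
      rw [hrevu, List.getElem?_append_left hl] at h5
      rw [hrevv, List.getElem?_append_left hl]
      exact h5 hc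
  · rw [← pvAlt_contract a x s hx]
    exact h6


lemma pvNoRedex_contract (k : Nat) (a : List String) (x : String) (s : List String)
    (_hx : x = "money" ∨ x = "number") (ha : a.length + 2 = k)
    (h : ∀ j, k + 1 ≤ j → ¬ pvRedexAt (a ++ x :: "," :: "number" :: s) j) :
    ∀ j, k ≤ j → ¬ pvRedexAt (a ++ x :: s) j := by
  intro j hj hR
  obtain ⟨hj2, hnum, hcomma, hset⟩ := hR
  have hu : a ++ x :: "," :: "number" :: s = (a ++ [x, ",", "number"]) ++ s := by simp
  have hv : a ++ x :: s = (a ++ [x]) ++ s := by simp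
  rw [hv, List.getElem?_append_right (by simp; omega)] at hnum
  rw [hv, List.getElem?_append_right (by simp; omega)] at hcomma
  simp only [List.length_append, List.length_cons, List.length_nil] at hnum hcomma
  apply h (j + 2) (by omega)
  refine ⟨by omega, ?_, ?_, ?_⟩
  · rw [hu, List.getElem?_append_right (by simp; omega)]
    simp only [List.length_append, List.length_cons, List.length_nil]
    rw [show j + 2 - (a.length + (0 + 1 + 1 + 1)) = j - (a.length + (0 + 1)) by omega]
    exact hnum
  · rw [hu, List.getElem?_append_right (by simp; omega)]
    simp only [List.length_append, List.length_cons, List.length_nil]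
    rw [show j + 2 - 1 - (a.length + (0 + 1 + 1 + 1)) = j - 1 - (a.length + (0 + 1)) by omega]
    exact hcomma
  · rw [show j + 2 - 2 = j by omega]
    by_cases hje : j = k
    · right
      subst hje
      have hu2 : a ++ x :: "," :: "number" :: s = (a ++ [x, ","]) ++ "number" :: s := by simp
      rw [hu2, List.getElem?_append_right (by simp; omega)]
      simp only [List.length_append, List.length_cons, List.length_nil]
      rw [show j - (a.length + (0 + 1 + 1)) = 0 by omega]
      rfl
    · rw [hv, List.getElem?_append_right (by simp; omega)] at hset
      simp only [List.length_append, List.length_cons, List.length_nil] at hset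
      rw [hu, List.getElem?_append_right (by simp; omega)]
      simp only [List.length_append, List.length_cons, List.length_nil]
      rw [show j - (a.length + (0 + 1 + 1 + 1)) = j - 2 - (a.length + (0 + 1)) by omega]
      exact hset


lemma pvGet_neg_one (xs : List String) :
    PySem.List.pyGet? xs (-1) = xs.reverse[0]? := by
  rw [PySem.List.pyGet?_neg_one, List.getLast?_eq_head?_reverse, List.head?_eq_getElem?]

lemma pvGet_neg_two (xs : List String) :
    PySem.List.pyGet? xs (-2) = xs.reverse[1]? := by
  by_cases h : 2 ≤ xs.length
  · rw [PySem.List.pyGet?_neg_ofNat xs 2 (by omega) h, List.getElem?_reverse (by omega)]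
    congr 1
  · rw [(PySem.List.pyGet?_eq_none_iff xs (-2)).mpr (by simp [PySem.Raise.InRange]; omega),
      List.getElem?_eq_none (by simp; omega)]

lemma pvStepA_main (t xs : List String) (k : Nat)
    (hlow : k ≤ 1 → ¬(PySem.List.pyGet? xs (k : Int) = some "number" ∧
        PySem.List.pyGet? xs ((k : Int) - 1) = some "," ∧
        (PySem.List.pyGet? xs ((k : Int) - 2) = some "money" ∨
          PySem.List.pyGet? xs ((k : Int) - 2) = some "number")))
    (hI : pvInv t xs)
    (hNR : ∀ j, k + 1 ≤ j → ¬ pvRedexAt xs j) :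
    pvInv t (pvStepA xs (k : Int)) ∧ (∀ j, k ≤ j → ¬ pvRedexAt (pvStepA xs (k : Int)) j) := by
  unfold pvStepA
  by_cases hlen : (k : Int) < (xs.length : Int)
  · have hklen : k < xs.length := by exact_mod_cast hlen
    rw [if_pos hlen]
    by_cases hc : PySem.List.pyGet? xs (k : Int) = some "number" ∧
        PySem.List.pyGet? xs ((k : Int) - 1) = some "," ∧
        (PySem.List.pyGet? xs ((k : Int) - 2) = some "money" ∨
          PySem.List.pyGet? xs ((k : Int) - 2) = some "number")
    · rw [if_pos hc]
      by_cases hk1 : k ≤ 1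
      · exact absurd hc (hlow hk1)
      · obtain ⟨hnum, hcom, hset⟩ := hc
        obtain ⟨m, rfl⟩ : ∃ m, k = m + 2 := ⟨k - 2, by omega⟩
        have e1 : ((m + 2 : Nat) : Int) - 1 = ((m + 1 : Nat) : Int) := by push_cast; ring
        have e2 : ((m + 2 : Nat) : Int) - 2 = ((m : Nat) : Int) := by push_cast; ring
        rw [PySem.List.pyGet?_natCast] at hnum
        rw [e1, PySem.List.pyGet?_natCast] at hcom
        rw [e2, PySem.List.pyGet?_natCast] at hset
        obtain ⟨hlt2, hv2⟩ := List.getElem?_eq_some_iff.mp hnum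
        obtain ⟨hlt1, hv1⟩ := List.getElem?_eq_some_iff.mp hcom
        have hltm : m < xs.length := by omega
        have hxset : xs[m] = "money" ∨ xs[m] = "number" := by
          rcases hset with hset | hset
          · exact Or.inl (List.getElem?_eq_some_iff.mp hset).2
          · exact Or.inr (List.getElem?_eq_some_iff.mp hset).2
        have hd3 : xs.drop m = xs[m] :: "," :: "number" :: xs.drop (m + 3) := by
          rw [List.drop_eq_getElem_cons hltm, List.drop_eq_getElem_cons hlt1,
            List.drop_eq_getElem_cons hlt2, hv1, hv2]
        have hdecomp : xs = xs.take m ++ xs[m] :: "," :: "number" :: xs.drop (m + 3) := by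
          conv_lhs => rw [← List.take_append_drop m xs]
          rw [hd3]
        have hdel : pvDel (pvDel xs ((m + 2 : Nat) : Int)) (((m + 2 : Nat) : Int) - 1) =
            xs.take m ++ xs[m] :: xs.drop (m + 3) := by
          rw [e1]
          unfold pvDel
          rw [if_neg (show ¬((m + 2 : Nat) : Int) < 0 by omega),
            if_neg (show ¬((m + 1 : Nat) : Int) < 0 by omega),
            Int.toNat_natCast, Int.toNat_natCast]
          rw [List.take_append_of_le_length (by rw [List.length_take]; omega)]
          rw [List.take_take, min_eq_left (by omega)]
          have hlt : (xs.take (m + 2)).length = m + 2 := by rw [List.length_take]; omega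
          rw [List.drop_append_of_le_length (by omega), List.drop_eq_nil_of_le (by omega),
            List.nil_append]
          have htake : xs.take (m + 1) = xs.take m ++ [xs[m]] := by
            rw [List.take_add_one, List.getElem?_eq_getElem hltm]
            simp
          rw [htake, List.append_assoc, List.singleton_append]
        have ha : (xs.take m).length + 2 = m + 2 := by rw [List.length_take]; omega
        constructor
        · rw [hdel]
          exact pvInv_contract t (xs.take m) xs[m] (xs.drop (m + 3)) hxset
            (by rw [← hdecomp]; exact hI)
        · rw [hdel]
          exact pvNoRedex_contract (m + 2) (xs.take m) xs[m] (xs.drop (m + 3)) hxset ha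
            (fun j hj hR => hNR j hj (by rw [hdecomp]; exact hR))
    · rw [if_neg hc]
      refine ⟨hI, fun j hjk hR => ?_⟩
      by_cases hje : j = k
      · subst hje
        obtain ⟨hj2, hnum, hcom, hset⟩ := hR
        apply hc
        have e1 : ((j : Int)) - 1 = ((j - 1 : Nat) : Int) := by omega
        have e2 : ((j : Int)) - 2 = ((j - 2 : Nat) : Int) := by omega
        rw [PySem.List.pyGet?_natCast, e1, PySem.List.pyGet?_natCast, e2,
          PySem.List.pyGet?_natCast]
        exact ⟨hnum, hcom, hset⟩
      · exact hNR j (by omega) hR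
  · rw [if_neg hlen]
    refine ⟨hI, fun j hjk hR => ?_⟩
    obtain ⟨-, hnum, -, -⟩ := hR
    obtain ⟨hlt, -⟩ := List.getElem?_eq_some_iff.mp hnum
    have : xs.length ≤ k := by exact_mod_cast not_lt.mp hlen
    omega


lemma pvLoop_main (k : Nat) (t : List String)
    (hD : ¬ D_merge_comma_seperated_numers t) : ∀ xs, pvInv t xs →
    (∀ j, k ≤ j → ¬ pvRedexAt xs j) →
    pvInv t (List.foldl pvStepA xs (pvDescR k)) ∧
      (∀ j, ¬ pvRedexAt (List.foldl pvStepA xs (pvDescR k)) j) := by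
  induction k with
  | zero =>
      intro xs hI hNR
      exact ⟨hI, fun j => hNR j (Nat.zero_le j)⟩
  | succ k ih =>
      intro xs hI hNR
      have hlow : k ≤ 1 → ¬(PySem.List.pyGet? xs (k : Int) = some "number" ∧
          PySem.List.pyGet? xs ((k : Int) - 1) = some "," ∧
          (PySem.List.pyGet? xs ((k : Int) - 2) = some "money" ∨
            PySem.List.pyGet? xs ((k : Int) - 2) = some "number")) := by
        intro hk1 hc
        obtain ⟨h1, h2, h3, h4, h5, h6⟩ := hI
        obtain ⟨hnum, hcom, hset⟩ := hc
        interval_cases k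
        · rw [show ((0 : Nat) : Int) = 0 by norm_num] at hnum hcom hset
          rw [show (0 : Int) - 1 = -1 by norm_num] at hcom
          rw [show (0 : Int) - 2 = -2 by norm_num] at hset
          rw [PySem.List.pyGet?_zero] at hnum
          rw [pvGet_neg_one] at hcom
          rw [pvGet_neg_two] at hset
          exact hD (Or.inr ⟨h1 ▸ hnum, h4.mp hcom, (h5 (h4.mp hcom)).mp hset⟩)
        · rw [show ((1 : Nat) : Int) - 1 = ((0 : Nat) : Int) by norm_num] at hcom
          rw [show ((1 : Nat) : Int) - 2 = -1 by norm_num] at hset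
          rw [PySem.List.pyGet?_natCast] at hnum hcom
          rw [pvGet_neg_one] at hset
          have ht0 : t[0]? = some "," := h1 ▸ hcom
          exact hD (Or.inl ⟨ht0, (h2 ht0) ▸ hnum, h3.mp hset⟩)
      obtain ⟨hI', hNR'⟩ := pvStepA_main t xs k hlow hI hNR
      simpa [pvDescR] using ih (pvStepA xs (k : Int)) hI' hNR'

-- the indices [k+1, …, 3, 2] processed before the two wraparound-capable indices 1, 0
def pvDescRto2 : Nat → List Int
  | 0 => []
  | k + 1 => ((k : Int) + 2) :: pvDescRto2 k

lemma pvDescR_split (k : Nat) : pvDescR (k + 2) = pvDescRto2 k ++ [(1 : Int), 0] := by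
  induction k with
  | zero => rfl
  | succ k ih =>
      show ((k + 2 : Nat) : Int) :: pvDescR (k + 2) = (((k : Int) + 2) :: pvDescRto2 k) ++ [(1 : Int), 0]
      rw [ih, List.cons_append]
      norm_num

lemma pvLoop2 (t : List String) : ∀ (k : Nat) (xs : List String), pvInv t xs →
    (∀ j, k + 2 ≤ j → ¬ pvRedexAt xs j) →
    pvInv t (List.foldl pvStepA xs (pvDescRto2 k)) ∧
      (∀ j, ¬ pvRedexAt (List.foldl pvStepA xs (pvDescRto2 k)) j) := by
  intro k
  induction k with
  | zero =>
      intro xs hI hNR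
      refine ⟨hI, fun j hR => ?_⟩
      rcases Nat.lt_or_ge j 2 with hj | hj
      · exact absurd hR.1 (by omega)
      · exact hNR j (by omega) hR
  | succ k ih =>
      intro xs hI hNR
      have hcast : ((k : Int) + 2) = ((k + 2 : Nat) : Int) := by push_cast; ring
      have hlow : k + 2 ≤ 1 → ¬(PySem.List.pyGet? xs ((k + 2 : Nat) : Int) = some "number" ∧
          PySem.List.pyGet? xs (((k + 2 : Nat) : Int) - 1) = some "," ∧
          (PySem.List.pyGet? xs (((k + 2 : Nat) : Int) - 2) = some "money" ∨
            PySem.List.pyGet? xs (((k + 2 : Nat) : Int) - 2) = some "number")) := by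
        intro h; omega
      obtain ⟨hI', hNR'⟩ := pvStepA_main t xs (k + 2) hlow hI (fun j hj => hNR j (by omega))
      have hres := ih (pvStepA xs ((k + 2 : Nat) : Int)) hI' hNR'
      simp only [pvDescRto2, List.foldl_cons, hcast]
      exact hres

lemma pvDel_len (xs : List String) (i : Int) : (pvDel xs i).length ≤ xs.length := by
  unfold pvDel
  split <;> simp <;> omega

lemma pvStepA_len (xs : List String) (i : Int) : (pvStepA xs i).length ≤ xs.length := by
  unfold pvStepA
  split
  · split
    · exact le_trans (pvDel_len _ _) (pvDel_len _ _)
    · exact le_rfl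
  · exact le_rfl

-- ===== VERDICT (by name: the statement is the Claim_ definition above) =====
theorem merge_comma_seperated_numers_spec : Claim_unchanged_merge_comma_seperated_numers := by
  intro tokens _ hD
  unfold merge_comma_seperated_numers
  by_cases hm : "number" ∈ tokens
  · simp only [hm, if_true]
    rw [pvDescR_eq tokens.length]
    obtain ⟨hI, hNR⟩ := pvLoop_main tokens.length tokens hD tokens (pvInv_refl tokens)
      (by intro j hj hR
          have := hR.2.1
          have hlt : j < tokens.length := by
            by_contra hge
            simp [List.getElem?_eq_none (le_of_not_gt (fun hh => hge hh))] at this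
          omega)
    have hNF := pvNF_of_noRedex _ hNR
    have := pvAlt_NF _ hNF
    rw [← hI.2.2.2.2.2]
    exact this.symm
  · simp only [hm, if_false]
    exact (pvAlt_noNumber tokens hm).symm

theorem merge_comma_seperated_numers_changed : Claim_changed_merge_comma_seperated_numers := by
  unfold Claim_changed_merge_comma_seperated_numers; decide

theorem merge_comma_seperated_numers_tight : Claim_exact_merge_comma_seperated_numers := by
  intro tokens _ hD hEq
  have hmem : "number" ∈ tokens := by
    rcases hD with ⟨-, h1, -⟩ | ⟨h0, -, -⟩
    · obtain ⟨h, hv⟩ := List.getElem?_eq_some_iff.mp h1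
      exact hv ▸ List.getElem_mem h
    · obtain ⟨h, hv⟩ := List.getElem?_eq_some_iff.mp h0
      exact hv ▸ List.getElem_mem h
  have hlen2 : 2 ≤ tokens.length := by
    rcases hD with ⟨-, h1, -⟩ | ⟨h0, hl, -⟩
    · obtain ⟨h, -⟩ := List.getElem?_eq_some_iff.mp h1
      omega
    · obtain ⟨h, -⟩ := List.getElem?_eq_some_iff.mp h0
      by_contra hc
      have he : tokens.length = 1 := by omega
      have : tokens.reverse[0]? = tokens[0]? := by
        rw [List.getElem?_reverse (by omega), he]
      rw [this, h0] at hl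
      simp at hl
  obtain ⟨m, hm⟩ : ∃ m, tokens.length = m + 2 := ⟨tokens.length - 2, by omega⟩
  have hA : merge_comma_seperated_numers tokens =
      pvStepA (pvStepA (List.foldl pvStepA tokens (pvDescRto2 m)) 1) 0 := by
    unfold merge_comma_seperated_numers
    rw [if_pos hmem, pvDescR_eq tokens.length, hm, pvDescR_split]
    rw [List.foldl_append]
    rfl
  set xs2 := List.foldl pvStepA tokens (pvDescRto2 m) with hxs2
  obtain ⟨hI, hNR⟩ := pvLoop2 tokens m tokens (pvInv_refl tokens)
    (by intro j hj hR
        obtain ⟨-, hnum, -, -⟩ := hR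
        obtain ⟨hlt, -⟩ := List.getElem?_eq_some_iff.mp hnum
        omega)
  have hBxs : merge_comma_seperated_numers_alt tokens = xs2 := by
    rw [← hI.2.2.2.2.2]
    exact pvAlt_NF xs2 (pvNF_of_noRedex xs2 hNR)
  obtain ⟨h1, h2, h3, h4, h5, h6⟩ := hI
  have hshort : (pvStepA (pvStepA xs2 1) 0).length < xs2.length := by
    rcases hD with ⟨ht0, ht1, htl⟩ | ⟨ht0, htl, htp⟩
    · -- wraparound fire at index 1
      have hx0 : xs2[0]? = some "," := by rw [h1, ht0]
      have hx1 : xs2[1]? = some "number" := by rw [h2 ht0, ht1]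
      have hxl : xs2.reverse[0]? = some "money" ∨ xs2.reverse[0]? = some "number" :=
        h3.mpr htl
      obtain ⟨r, hab⟩ : ∃ r, xs2 = "," :: "number" :: r := by
        rcases he : xs2 with _ | ⟨a, _ | ⟨b, r⟩⟩
        · rw [he] at hx0; simp at hx0
        · rw [he] at hx1; simp at hx1
        · rw [he] at hx0 hx1
          simp at hx0 hx1
          exact ⟨r, by rw [hx0, hx1]⟩
      rw [hab] at hxl
      have hfire : pvStepA xs2 1 = r := by
        rw [hab]
        unfold pvStepA
        rw [if_pos (by simp), if_pos ?_]
        · unfold pvDel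
          norm_num
        · refine ⟨?_, ?_, ?_⟩
          · rw [show (1 : Int) = ((1 : Nat) : Int) by norm_num, PySem.List.pyGet?_natCast]
            rfl
          · rw [show (1 : Int) - 1 = 0 by norm_num, PySem.List.pyGet?_zero]
            rfl
          · rw [show (1 : Int) - 2 = -1 by norm_num, pvGet_neg_one]
            exact hxl
      rw [hfire]
      have hst := pvStepA_len r 0
      have hlab : xs2.length = r.length + 2 := by rw [hab]; simp
      omega
    · -- no fire at index 1, wraparound fire at index 0
      have hx0 : xs2[0]? = some "number" := by rw [h1, ht0]
      have hxl : xs2.reverse[0]? = some "," := h4.mpr htl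
      have hxp : xs2.reverse[1]? = some "money" ∨ xs2.reverse[1]? = some "number" :=
        (h5 htl).mpr htp
      have hlx : 2 ≤ xs2.length := by
        rcases hxp with hxp | hxp <;>
          · obtain ⟨hlt, -⟩ := List.getElem?_eq_some_iff.mp hxp
            simp at hlt
            omega
      have hskip : pvStepA xs2 1 = xs2 := by
        unfold pvStepA
        split
        · rw [if_neg ?_]
          rintro ⟨-, hcom, -⟩
          rw [show (1 : Int) - 1 = 0 by norm_num, PySem.List.pyGet?_zero, hx0] at hcom
          simp at hcom
        · rfl
      rw [hskip]
      have hfire : pvStepA xs2 0 = pvDel (pvDel xs2 0) ((0 : Int) - 1) := by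
        unfold pvStepA
        rw [if_pos (by omega), if_pos ?_]
        refine ⟨?_, ?_, ?_⟩
        · rw [PySem.List.pyGet?_zero]
          exact hx0
        · rw [show (0 : Int) - 1 = -1 by norm_num, pvGet_neg_one]
          exact hxl
        · rw [show (0 : Int) - 2 = -2 by norm_num, pvGet_neg_two]
          exact hxp
      have e1 : pvDel xs2 0 = xs2.drop 1 := by
        unfold pvDel
        norm_num
      rw [hfire, e1]
      have hb := pvDel_len (xs2.drop 1) ((0 : Int) - 1)
      have hd : (xs2.drop 1).length = xs2.length - 1 := by simp
      omega
  rw [hA, hBxs] at hEq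
  rw [hEq] at hshort
  omega
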